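-- pv_equiv track=rewrite | github.com/Xzonn/nitrogfx-py | nitrogfx/ncgr.py | flip_tile
-- ===== SOURCE A (Python) =====
-- def flip_tile(tile, xflip, yflip):
--         if not xflip and not yflip:
--                 return tile
--         t = []
--         for y in range(8):
--                 for x in range(8):
--                         y2 = 7-y if yflip else y
--                         x2 = 7-x if xflip else x
--                         t.append(tile[8*y2+x2])
--         return t
-- ===== SOURCE B (Python) =====
-- def flip_tile(tile, xflip, yflip):
--     if not xflip and not yflip:
--         return tile
--     rows = [[tile[8 * r + c] for c in range(8)] for r in range(8)]
--     if yflip: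
--         rows.reverse()
--     out = []
--     for row in rows:
--         out.extend(reversed(row) if xflip else row)
--     return out
-- ===== Notes on version B (the rewrite author's own statement) =====
-- stated objective: simpler
-- what changed: B reads the tile as 8 whole rows in natural order and performs the flips structurally by reversing the list of rows (yflip) and reversing each row (xflip) before concatenating, instead of A's per-pixel conditional source-index arithmetic inside nested loops.
import Mathlib
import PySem

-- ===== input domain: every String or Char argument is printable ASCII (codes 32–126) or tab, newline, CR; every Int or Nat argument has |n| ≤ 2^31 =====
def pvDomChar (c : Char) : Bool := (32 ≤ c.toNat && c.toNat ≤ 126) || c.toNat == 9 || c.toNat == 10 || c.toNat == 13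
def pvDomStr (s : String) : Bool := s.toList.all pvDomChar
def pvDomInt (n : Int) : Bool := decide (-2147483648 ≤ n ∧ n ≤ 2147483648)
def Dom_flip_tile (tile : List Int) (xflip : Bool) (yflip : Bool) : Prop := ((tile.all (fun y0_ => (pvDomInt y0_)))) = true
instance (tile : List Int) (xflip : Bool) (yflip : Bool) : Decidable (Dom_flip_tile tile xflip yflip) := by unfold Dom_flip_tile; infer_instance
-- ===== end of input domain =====

-- B reads the tile as 8 whole rows and flips by reversing the row list (yflip) and each
-- row (xflip) instead of A's nested loops with per-pixel conditional index arithmetic; objective: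
-- simpler (same cost).

-- ===== PORT A =====
def flip_tile (tile : List Int) (xflip : Bool) (yflip : Bool) : List Int :=
  if !xflip && !yflip then tile
  else
    (PySem.List.pyRange 0 8 1).foldl (fun t y =>
      (PySem.List.pyRange 0 8 1).foldl (fun t x =>
        let y2 : Int := if yflip then 7 - y else y
        let x2 : Int := if xflip then 7 - x else x
        t ++ [PySem.List.pyGetD tile (8 * y2 + x2) 0]) t) []

-- ===== PORT B =====
def flip_tile_alt (tile : List Int) (xflip : Bool) (yflip : Bool) : List Int :=
  if !xflip && !yflip then tile
  else
    let rows := (PySem.List.pyRange 0 8 1).map (fun r =>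
      (PySem.List.pyRange 0 8 1).map (fun c => PySem.List.pyGetD tile (8 * r + c) 0))
    let rows := if yflip then rows.reverse else rows
    rows.foldl (fun out row => out ++ (if xflip then row.reverse else row)) []

-- ===== PRECONDITION & SPEC =====
-- When a flip is requested A indexes tile[0..63] and raises IndexError on tiles shorter than
-- 64; Pre_ excludes exactly those raising inputs (with no flip A returns the tile unchanged
-- for any length, which Pre_ admits).
def Pre_flip_tile (tile : List Int) (xflip : Bool) (yflip : Bool) : Prop :=
  (xflip = false ∧ yflip = false) ∨ 64 ≤ tile.length
instance (tile : List Int) (xflip : Bool) (yflip : Bool) : Decidable (Pre_flip_tile tile xflip yflip) := by unfold Pre_flip_tile; infer_instance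

def pvWitness_flip_tile : List Int × Bool × Bool := (List.replicate 64 (0:Int), true, true)

def Spec_flip_tile (tile : List Int) (xflip : Bool) (yflip : Bool) (out : List Int) : Prop := out = flip_tile_alt tile xflip yflip
instance (tile : List Int) (xflip : Bool) (yflip : Bool) (out : List Int) : Decidable (Spec_flip_tile tile xflip yflip out) := by unfold Spec_flip_tile; infer_instance

-- ===== CLAIM (what is proved, stated in full; the proofs are below) =====
def Claim_equal_flip_tile : Prop := ∀ (tile : List Int) (xflip : Bool) (yflip : Bool), Dom_flip_tile tile xflip yflip → Pre_flip_tile tile xflip yflip → Spec_flip_tile tile xflip yflip (flip_tile tile xflip yflip)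


-- ===== LEMMAS AND PROOFS =====

set_option maxHeartbeats 2000000 in
lemma flip_agree (tile : List Int) (xflip yflip : Bool) :
    flip_tile tile xflip yflip = flip_tile_alt tile xflip yflip := by
  have hr8 : PySem.List.pyRange 0 8 1 = [0,1,2,3,4,5,6,7] := by decide
  cases xflip <;> cases yflip
  case false.false => simp [flip_tile, flip_tile_alt]
  all_goals {
    simp only [flip_tile, flip_tile_alt, hr8, List.map, List.foldl, List.reverse,
      Bool.and_self, Bool.not_true, Bool.not_false, Bool.false_and, Bool.and_false,
      Bool.and_true, if_false, if_true, Bool.false_eq_true]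
    norm_num
  }

-- ===== VERDICT (by name: the statement is the Claim_ definition above) =====
theorem flip_tile_spec : Claim_equal_flip_tile := by
  intro tile xflip yflip _ _
  unfold Spec_flip_tile
  exact flip_agree tile xflip yflip
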